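-- pv_equiv track=rewrite | github.com/Yadhuvtk/Ai_Drawing | yd_vector/hybrid_vectorizer_v2/ellipse_subshape.py | _contiguous_runs
-- ===== SOURCE A (Python) =====
-- def _contiguous_runs(flags: list[bool]) -> list[tuple[int, int]]:
--     if not flags:
--         return []
--     runs: list[tuple[int, int]] = []
--     count = len(flags)
--     for index in range(count):
--         if flags[index] and not flags[(index - 1) % count]:
--             length = 0
--             while flags[(index + length) % count] and length < count:
--                 length += 1
--             runs.append((index, length))
--     return runs
-- ===== SOURCE B (Python) =====
-- def _contiguous_runs(flags: list[bool]) -> list[tuple[int, int]]: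
--     # Single left-to-right pass (no modular indexing), then a circular-merge
--     # post-step joining the trailing run with the leading run when both wrap.
--     if not flags or all(flags):
--         return []
--     n = len(flags)
--     runs: list[tuple[int, int]] = []
--     start = None
--     for i, f in enumerate(flags):
--         if f:
--             if start is None:
--                 start = i
--         else:
--             if start is not None:
--                 runs.append((start, i - start))
--                 start = None
--     if start is not None:
--         runs.append((start, n - start))
--     if flags[0] and flags[-1]:
--         first_len = runs.pop(0)[1]
--         last_start, last_len = runs.pop()
--         runs.append((last_start, last_len + first_len))
--     return runs
-- ===== Notes on version B (the rewrite author's own statement) =====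
-- stated objective: alternative
-- what changed: Replaces the per-index modular-arithmetic scan (start test via flags[(i-1)%n] plus an inner wrap-around while loop per run) with a single linear enumerate pass carrying an open-run accumulator, followed by one circular-merge post-step that folds the leading run's length into the trailing run.
import Mathlib
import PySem

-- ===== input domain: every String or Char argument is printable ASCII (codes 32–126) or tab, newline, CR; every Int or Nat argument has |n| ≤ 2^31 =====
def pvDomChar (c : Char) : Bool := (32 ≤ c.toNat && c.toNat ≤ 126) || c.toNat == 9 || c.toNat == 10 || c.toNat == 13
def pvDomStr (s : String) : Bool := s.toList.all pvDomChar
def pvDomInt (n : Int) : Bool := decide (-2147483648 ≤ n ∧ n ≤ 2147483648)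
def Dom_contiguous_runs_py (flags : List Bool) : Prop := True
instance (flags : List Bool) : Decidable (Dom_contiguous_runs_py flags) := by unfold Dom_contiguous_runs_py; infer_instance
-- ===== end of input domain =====

-- B is an alternative linear implementation: one left-to-right pass with an open-run
-- accumulator plus a circular-merge post-step, instead of A's modular-index scan.

-- ===== PORT A =====
-- the inner 'while flags[(index+length)%count] and length < count: length += 1' loop;
-- fuel count+1 always suffices because the loop body requires length < count.
def aWhile (flags : List Bool) (count index : Int) : Nat → Int → Int
  | 0, length => length
  | fuel+1, length =>
    if PySem.List.pyGetD flags (PySem.Int.mod (index + length) count) false = true ∧ length < count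
    then aWhile flags count index fuel (length + 1)
    else length

def contiguous_runs_py (flags : List Bool) : List (Int × Int) :=
  if flags = [] then []
  else
    let count : Int := flags.length
    (PySem.List.pyRange 0 count 1).foldl
      (fun runs index =>
        if PySem.List.pyGetD flags index false = true ∧
           ¬ (PySem.List.pyGetD flags (PySem.Int.mod (index - 1) count) false = true)
        then runs ++ [(index, aWhile flags count index (count.toNat + 1) 0)]
        else runs) []

-- ===== PORT B =====
-- one step of the 'for i, f in enumerate(flags)' loop; state = (runs so far, open run start)
def bStep (st : List (Int × Int) × Option Int) (p : Int × Bool) : List (Int × Int) × Option Int :=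
  if p.2 then
    match st.2 with
    | none => (st.1, some p.1)
    | some _ => st
  else
    match st.2 with
    | some s => (st.1 ++ [(s, p.1 - s)], none)
    | none => st

def contiguous_runs_py_alt (flags : List Bool) : List (Int × Int) :=
  if flags = [] ∨ flags.all id then []
  else
    let n : Int := flags.length
    let st := (PySem.List.enumerate flags 0).foldl bStep ([], none)
    let runs : List (Int × Int) :=
      match st.2 with
      | some s => st.1 ++ [(s, n - s)]
      | none => st.1
    if PySem.List.pyGetD flags 0 false = true ∧ PySem.List.pyGetD flags (-1) false = true then
      -- runs.pop(0); runs.pop(); runs.append(...)  — both pops are in range here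
      match runs with
      | [] => []
      | (_, l0) :: rest =>
        match rest.getLast? with
        | none => []
        | some (ls, ll) => rest.dropLast ++ [(ls, ll + l0)]
    else runs

-- ===== PRECONDITION & SPEC =====
def Spec_contiguous_runs_py (flags : List Bool) (out : List (Int × Int)) : Prop := out = contiguous_runs_py_alt flags
instance (flags : List Bool) (out : List (Int × Int)) : Decidable (Spec_contiguous_runs_py flags out) := by unfold Spec_contiguous_runs_py; infer_instance

-- ===== CLAIM (what is proved, stated in full; the proofs are below) =====
def Claim_equal_contiguous_runs_py : Prop := ∀ (flags : List Bool), Dom_contiguous_runs_py flags → Spec_contiguous_runs_py flags (contiguous_runs_py flags)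

-- ===== LEMMAS AND PROOFS =====

def castP (p : Nat × Nat) : Int × Int := ((p.1 : Int), (p.2 : Int))

def castList (l : List (Nat × Nat)) : List (Int × Int) := l.map castP

def sScan (l : List Bool) (i : Nat) : List (Nat × Nat) × Option Nat :=
  match l with
  | [] => ([], none)
  | false :: rest => sScan rest (i+1)
  | true :: rest =>
    let t := (rest.takeWhile id).length
    if h : rest.length ≤ t then ([], some i)
    else
      let p := sScan (rest.drop (t+1)) (i + t + 2)
      ((i, t+1) :: p.1, p.2)
termination_by l.length
decreasing_by
  all_goals simp
  all_goals omega

def aStep (flags : List Bool) (count : Int) (runs : List (Int × Int)) (index : Int) : List (Int × Int) :=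
  if PySem.List.pyGetD flags index false = true ∧
     ¬ (PySem.List.pyGetD flags (PySem.Int.mod (index - 1) count) false = true)
  then runs ++ [(index, aWhile flags count index (count.toNat + 1) 0)]
  else runs

theorem A_def (flags : List Bool) (h : ¬ flags = []) :
    contiguous_runs_py flags
      = (PySem.List.pyRange 0 (flags.length : Int) 1).foldl (aStep flags (flags.length : Int)) [] := by
  simp only [contiguous_runs_py, if_neg h]
  rfl

theorem tw_lt (l : List Bool) (k : Nat) (h : k < (l.takeWhile id).length) :
    l.getD k false = true := by
  induction l generalizing k with
  | nil => simp at h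
  | cons b rest ih =>
    cases b with
    | false => simp [List.takeWhile] at h
    | true =>
      cases k with
      | zero => simp
      | succ m =>
        simp [List.takeWhile] at h
        simpa using ih m h

theorem tw_stop (l : List Bool) (h : (l.takeWhile id).length < l.length) :
    l.getD ((l.takeWhile id).length) false = false := by
  induction l with
  | nil => simp at h
  | cons b rest ih =>
    cases b with
    | false => simp [List.takeWhile]
    | true =>
      simp only [List.takeWhile, id] at h ⊢
      simp at h ⊢
      exact ih h

theorem tw_min (l : List Bool) (m : Nat) (h : l.getD m false = false) :
    (l.takeWhile id).length ≤ m := by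
  induction l generalizing m with
  | nil => simp
  | cons b rest ih =>
    cases b with
    | false => simp [List.takeWhile]
    | true =>
      cases m with
      | zero => simp at h
      | succ k =>
        simp [List.takeWhile]
        exact ih k (by simpa using h)

theorem tw_all (l : List Bool) (h : (l.takeWhile id).length = l.length) : l.all id = true := by
  induction l with
  | nil => simp
  | cons b rest ih =>
    cases b with
    | false => simp [List.takeWhile] at h
    | true =>
      simp [List.takeWhile] at h
      simpa using ih h

theorem all_getD (l : List Bool) (h : l.all id = true) (m : Nat) (hm : m < l.length) :
    l.getD m false = true := by
  rw [List.getD_eq_getElem l false hm]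
  exact (List.all_eq_true.mp h) _ (l.getElem_mem hm)

theorem getD_drop (l : List Bool) (i k : Nat) :
    (l.drop i).getD k false = l.getD (i+k) false := by
  simp [List.getD, List.getElem?_drop]

theorem getLast?_drop (l : List Bool) (i : Nat) (h : i < l.length) :
    (l.drop i).getLast? = l.getLast? := by
  induction l generalizing i with
  | nil => simp
  | cons b rest ih =>
    cases i with
    | zero => simp
    | succ j =>
      simp only [List.drop_succ_cons]
      rw [ih j (by simpa using h)]
      cases rest with
      | nil => simp at h
      | cons c cs => simp [List.getLast?_cons_cons]

theorem last_getD (l : List Bool) (h : ¬ l = []) :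
    l.getLast? = some (l.getD (l.length - 1) false) := by
  rw [List.getLast?_eq_getElem?]
  rw [List.getD_eq_getElem l false (by cases l with | nil => simp at h | cons a t => simp)]
  rw [List.getElem?_eq_getElem (by cases l with | nil => simp at h | cons a t => simp)]

theorem sScan_some (l : List Bool) (i : Nat) : ∀ s, (sScan l i).2 = some s →
    i ≤ s ∧ s < i + l.length ∧ l.getLast? = some true := by
  induction l, i using sScan.induct with
  | case1 i => intro s h; simp [sScan] at h
  | case2 i rest ih =>
    intro s h
    rw [sScan] at h
    obtain ⟨h1, h2, h3⟩ := ih s h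
    refine ⟨by omega, by simp; omega, ?_⟩
    cases rest with
    | nil => simp at h3
    | cons c cs => simpa [List.getLast?_cons_cons] using h3
  | case3 i rest t hle =>
    intro s h
    have hle' : rest.length ≤ (List.takeWhile id rest).length := hle
    rw [sScan] at h
    rw [dif_pos hle'] at h
    obtain rfl : i = s := by simpa using h
    refine ⟨le_refl _, by simp, ?_⟩
    cases rest with
    | nil => simp
    | cons c cs =>
      rw [last_getD _ (by simp)]
      congr 1
      have h2 := tw_lt (c :: cs) ((c::cs).length - 1) (by
        have : (c :: cs).length ≤ (List.takeWhile id (c :: cs)).length := hle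
        simp at this ⊢; omega)
      simpa using h2
  | case4 i rest t hle ih =>
    intro s h
    have hle' : ¬ rest.length ≤ (List.takeWhile id rest).length := hle
    rw [sScan] at h
    rw [dif_neg hle'] at h
    obtain ⟨h1, h2, h3⟩ := ih s h
    have hlen : (List.drop ((List.takeWhile id rest).length + 1) rest).length
        = rest.length - (List.takeWhile id rest).length - 1 := by simp; omega
    refine ⟨by omega, by simp at h2 ⊢; omega, ?_⟩
    have hlt : (List.takeWhile id rest).length + 1 < rest.length := by
      by_contra hc
      have : (List.drop ((List.takeWhile id rest).length + 1) rest) = [] := by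
        apply List.drop_eq_nil_of_le; omega
      rw [this] at h3; simp at h3
    rw [getLast?_drop rest _ hlt] at h3
    cases rest with
    | nil => simp at h3
    | cons c cs => simpa [List.getLast?_cons_cons] using h3

theorem sScan_isSome (l : List Bool) (i : Nat) : l.getLast? = some true →
    ∃ s, (sScan l i).2 = some s := by
  induction l, i using sScan.induct with
  | case1 i => intro h; simp at h
  | case2 i rest ih =>
    intro h
    rw [sScan]
    apply ih
    cases rest with
    | nil => simp at h
    | cons c cs => simpa [List.getLast?_cons_cons] using h
  | case3 i rest t hle =>
    intro h
    have hle' : rest.length ≤ (List.takeWhile id rest).length := hle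
    rw [sScan]
    rw [dif_pos hle']
    exact ⟨i, rfl⟩
  | case4 i rest t hle ih =>
    intro h
    have hle' : ¬ rest.length ≤ (List.takeWhile id rest).length := hle
    rw [sScan]
    rw [dif_neg hle']
    apply ih
    have hlt : (List.takeWhile id rest).length + 1 < rest.length := by
      rcases Nat.lt_or_ge ((List.takeWhile id rest).length + 1) rest.length with hc | hc
      · exact hc
      · exfalso
        have he : (List.takeWhile id rest).length = rest.length - 1 := by omega
        have hstop := tw_stop rest (by omega)
        have hlast : rest.getLast? = some true := by
          cases rest with
          | nil => simp at hle
          | cons c cs => simpa [List.getLast?_cons_cons] using h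
        rw [last_getD rest (by intro hne; subst hne; simp at hle)] at hlast
        rw [he] at hstop
        rw [hstop] at hlast
        simp at hlast
    rw [getLast?_drop rest _ hlt]
    cases rest with
    | nil => simp at hle
    | cons c cs => simpa [List.getLast?_cons_cons] using h

theorem dropWhile_eq_drop (l : List Bool) :
    l.dropWhile id = l.drop ((l.takeWhile id).length) := by
  induction l with
  | nil => simp
  | cons b rest ih =>
    cases b with
    | false => simp [List.dropWhile, List.takeWhile]
    | true => simpa [List.dropWhile, List.takeWhile] using ih

theorem fold_open (tl : List Bool) (h : ∀ x ∈ tl, x = true) (j : Int)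
    (acc : List (Int × Int)) (s : Int) :
    (PySem.List.enumerate tl j).foldl bStep (acc, some s) = (acc, some s) := by
  induction tl generalizing j with
  | nil => simp [PySem.List.enumerate_nil]
  | cons b rest ih =>
    have hb : b = true := h b (by simp)
    subst hb
    rw [PySem.List.enumerate_cons]
    simp only [List.foldl_cons]
    have : bStep (acc, some s) (j, true) = (acc, some s) := by simp [bStep]
    rw [this]
    exact ih (fun x hx => h x (by simp [hx])) (j+1)

theorem fold_none (l : List Bool) (i : Nat) : ∀ (acc : List (Int × Int)),
    (PySem.List.enumerate l (i : Int)).foldl bStep (acc, none)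
      = (acc ++ castList (sScan l i).1, Option.map Int.ofNat (sScan l i).2) := by
  induction l, i using sScan.induct with
  | case1 i => intro acc; simp [PySem.List.enumerate_nil, sScan, castList]
  | case2 i rest ih =>
    intro acc
    rw [PySem.List.enumerate_cons]
    simp only [List.foldl_cons]
    have hs : bStep (acc, none) ((i : Int), false) = (acc, none) := by simp [bStep]
    rw [hs, sScan]
    have : ((i : Int) + 1) = ((i + 1 : Nat) : Int) := by push_cast; ring
    rw [this]
    exact ih acc
  | case3 i rest t hle =>
    intro acc
    have hle' : rest.length ≤ (List.takeWhile id rest).length := hle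
    have ht : (List.takeWhile id rest) = rest := by
      apply List.IsPrefix.eq_of_length (List.takeWhile_prefix id)
      exact le_antisymm (List.IsPrefix.length_le (List.takeWhile_prefix id)) hle'
    rw [PySem.List.enumerate_cons]
    simp only [List.foldl_cons]
    have hs : bStep (acc, none) ((i : Int), true) = (acc, some (i : Int)) := by simp [bStep]
    rw [hs]
    rw [fold_open rest (fun x hx => by
      have : x ∈ List.takeWhile id rest := by rw [ht]; exact hx
      exact List.mem_takeWhile_imp this) _ acc _]
    rw [sScan]
    rw [dif_pos hle']
    simp [castList]
  | case4 i rest t hle ih =>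
    intro acc
    have hle' : ¬ rest.length ≤ (List.takeWhile id rest).length := hle
    have hlt : (List.takeWhile id rest).length < rest.length := by omega
    rw [PySem.List.enumerate_cons]
    simp only [List.foldl_cons]
    have hs : bStep (acc, none) ((i : Int), true) = (acc, some (i : Int)) := by simp [bStep]
    rw [hs]
    -- decompose rest = takeWhile ++ getD t :: drop (t+1)
    have hdec : rest = (List.takeWhile id rest) ++ (rest.getD ((List.takeWhile id rest).length) false) :: rest.drop ((List.takeWhile id rest).length + 1) := by
      conv_lhs => rw [← List.takeWhile_append_dropWhile (p := id) (l := rest)]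
      congr 1
      rw [dropWhile_eq_drop]
      rw [List.getD_eq_getElem rest false hlt]
      exact List.drop_eq_getElem_cons hlt
    have hfalse : rest.getD ((List.takeWhile id rest).length) false = false := tw_stop rest hlt
    rw [hfalse] at hdec
    conv_lhs => rw [hdec]
    rw [PySem.List.enumerate_append]
    rw [List.foldl_append]
    rw [fold_open (List.takeWhile id rest) (fun x hx => List.mem_takeWhile_imp hx) _ acc _]
    rw [PySem.List.enumerate_cons]
    simp only [List.foldl_cons]
    have hs2 : bStep (acc, some (i : Int)) (((i : Int) + 1 + (List.takeWhile id rest).length), false)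
        = (acc ++ [((i : Int), ((List.takeWhile id rest).length : Int) + 1)], none) := by
      simp [bStep]; ring
    rw [hs2]
    have harg : ((i : Int) + 1 + (List.takeWhile id rest).length + 1)
        = ((i + (List.takeWhile id rest).length + 2 : Nat) : Int) := by push_cast; ring
    rw [harg]
    rw [ih (acc ++ [((i : Int), ((List.takeWhile id rest).length : Int) + 1)])]
    rw [sScan]
    rw [dif_neg hle']
    simp [castList, castP]
    exact ⟨rfl, rfl⟩

theorem fold_none0 (l : List Bool) (acc : List (Int × Int)) :
    (PySem.List.enumerate l (0 : Int)).foldl bStep (acc, none)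
      = (acc ++ castList (sScan l 0).1, Option.map Int.ofNat (sScan l 0).2) := by
  have h := fold_none l 0 acc
  simpa using h

theorem aWhile_spec (flags : List Bool) (count index : Int) : ∀ (fuel : Nat) (len : Int) (D : Nat),
    D < fuel →
    (∀ j : Nat, j < D →
      (PySem.List.pyGetD flags (PySem.Int.mod (index + (len + j)) count) false = true ∧ len + j < count)) →
    (¬ (PySem.List.pyGetD flags (PySem.Int.mod (index + (len + D)) count) false = true ∧ len + D < count)) →
    aWhile flags count index fuel len = len + D := by
  intro fuel
  induction fuel with
  | zero => intro len D h; omega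
  | succ f ih =>
    intro len D hD hrun hstop
    cases D with
    | zero =>
      rw [aWhile]
      rw [if_neg (by simpa using hstop)]
      simp
    | succ d =>
      rw [aWhile]
      have h0 := hrun 0 (by omega)
      rw [if_pos (by simpa using h0)]
      have := ih (len + 1) d (by omega)
        (fun j hj => by
          have := hrun (j+1) (by omega)
          constructor
          · have harg : index + (len + 1 + (j : Int)) = index + (len + ((j:Nat) + 1 : Nat)) := by push_cast; ring
            rw [harg]; exact this.1
          · push_cast at this ⊢; omega)
        (by
          intro hc
          apply hstop
          constructor
          · have harg : index + (len + ((d:Nat)+1 : Nat)) = index + (len + 1 + (d : Int)) := by push_cast; ring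
            rw [harg]; exact hc.1
          · push_cast at hc ⊢; omega)
      rw [this]
      push_cast
      ring

theorem A_noop (flags : List Bool) (count : Int) (a b : Int) :
    ∀ (acc : List (Int × Int)),
    (∀ k : Int, a ≤ k → k < b →
      ¬ (PySem.List.pyGetD flags k false = true ∧
         ¬ (PySem.List.pyGetD flags (PySem.Int.mod (k - 1) count) false = true))) →
    (PySem.List.pyRange a b 1).foldl (aStep flags count) acc = acc := by
  have H : ∀ (N : Nat) (a : Int), (b - a).toNat = N → ∀ acc,
      (∀ k : Int, a ≤ k → k < b →
        ¬ (PySem.List.pyGetD flags k false = true ∧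
           ¬ (PySem.List.pyGetD flags (PySem.Int.mod (k - 1) count) false = true))) →
      (PySem.List.pyRange a b 1).foldl (aStep flags count) acc = acc := by
    intro N
    induction N with
    | zero =>
      intro a hN acc h
      rw [PySem.List.pyRange_one_eq_nil (by omega)]
      simp
    | succ m ihm =>
      intro a hN acc h
      rw [PySem.List.pyRange_one_cons (by omega)]
      simp only [List.foldl_cons]
      have hstep : aStep flags count acc a = acc := by
        rw [aStep, if_neg (h a (le_refl _) (by omega))]
      rw [hstep]
      exact ihm (a+1) (by omega) acc (fun k hk1 hk2 => h k (by omega) hk2)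
  intro acc h
  exact H (b - a).toNat a rfl acc h

theorem mod_lt_eq (n : Nat) (x : Int) (h0 : 0 ≤ x) (h1 : x < (n : Int)) :
    PySem.Int.mod x (n : Int) = x := by
  rw [PySem.Int.mod_eq_emod_of_pos (by omega)]
  exact Int.emod_eq_of_lt h0 h1

theorem mod_ge_eq (n : Nat) (x : Int) (h0 : (n : Int) ≤ x) (h1 : x < 2*(n : Int)) :
    PySem.Int.mod x (n : Int) = x - n := by
  rw [PySem.Int.mod_eq_emod_of_pos (by omega)]
  rw [← Int.sub_emod_right]
  exact Int.emod_eq_of_lt (by omega) (by omega)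

theorem mod_neg1 (n : Nat) (hn : 0 < n) : PySem.Int.mod (-1) (n : Int) = (n : Int) - 1 := by
  rw [PySem.Int.mod_eq_emod_of_pos (by omega)]
  rw [show (-1 : Int) = ((n : Int) - 1) - n by ring]
  rw [Int.sub_emod_right]
  exact Int.emod_eq_of_lt (by omega) (by omega)

theorem A_fold (flags : List Bool) (hW : (flags.takeWhile id).length < flags.length) :
    ∀ (l : List Bool) (i : Nat), ∀ (acc : List (Int × Int)),
    l = flags.drop i → i ≤ flags.length →
    (flags.getD i false = true →
      (i = 0 ∧ flags.getD (flags.length - 1) false = false) ∨ (0 < i ∧ flags.getD (i-1) false = false)) →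
    (PySem.List.pyRange (i : Int) (flags.length : Int) 1).foldl (aStep flags (flags.length : Int)) acc
      = acc ++ castList (sScan l i).1 ++
        (match (sScan l i).2 with
         | some s => [((s : Int), ((flags.length - s : Nat) : Int) +
             (if flags.getD 0 false = true then ((flags.takeWhile id).length : Int) else 0))]
         | none => []) := by
  have hn0 : 0 < flags.length := by omega
  have hw0 : flags.getD ((flags.takeWhile id).length) false = false := tw_stop flags hW
  have hifw : (if flags.getD 0 false = true then ((flags.takeWhile id).length : Int) else 0)
      = ((flags.takeWhile id).length : Int) := by
    by_cases hg : flags.getD 0 false = true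
    · rw [if_pos hg]
    · rw [if_neg hg]
      have : (flags.takeWhile id).length = 0 := by
        have := tw_min flags 0 (by simpa using Bool.eq_false_iff.mpr (by simpa using hg))
        omega
      rw [this]; simp
  intro l i
  induction l, i using sScan.induct with
  | case1 i =>
    intro acc hl hi hpre
    have : flags.length ≤ i := by
      by_contra hc
      have := congrArg List.length hl
      simp at this
      omega
    rw [PySem.List.pyRange_one_eq_nil (by omega)]
    simp [sScan, castList]
  | case2 i rest ih =>
    intro acc hl hi hpre
    have hilt : i < flags.length := by
      have := congrArg List.length hl
      simp at this; omega
    have hgi : flags.getD i false = false := by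
      have h0 := getD_drop flags i 0
      rw [← hl] at h0
      simpa using h0.symm
    have hrest : rest = flags.drop (i+1) := by
      have : (flags.drop i).tail = flags.drop (i+1) := by
        rw [List.tail_drop]
      rw [← hl] at this
      simpa using this
    rw [PySem.List.pyRange_one_cons (by push_cast; omega)]
    simp only [List.foldl_cons]
    have hstep : aStep flags (flags.length : Int) acc (i : Int) = acc := by
      rw [aStep, if_neg]
      intro hc
      rw [PySem.List.pyGetD_natCast] at hc
      rw [hgi] at hc
      simp at hc
    rw [hstep]
    have harg : ((i : Int) + 1) = ((i+1 : Nat) : Int) := by push_cast; ring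
    rw [harg, sScan]
    exact ih acc hrest (by omega) (by
      intro hg
      right
      constructor
      · omega
      · simpa using hgi)
  | case3 i rest t hle =>
    intro acc hl hi hpre
    have hilt : i < flags.length := by
      have := congrArg List.length hl
      simp at this; omega
    have hlen : rest.length = flags.length - i - 1 := by
      have := congrArg List.length hl
      simp at this; omega
    have hrest : rest = flags.drop (i+1) := by
      have : (flags.drop i).tail = flags.drop (i+1) := by rw [List.tail_drop]
      rw [← hl] at this
      simpa using this
    have hgi : flags.getD i false = true := by
      have h0 := getD_drop flags i 0
      rw [← hl] at h0
      simpa using h0.symm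
    have htw : rest.length = (rest.takeWhile id).length :=
      le_antisymm hle (List.IsPrefix.length_le (List.takeWhile_prefix id))
    -- every position from i to n-1 is true
    have hall : ∀ k, i ≤ k → k < flags.length → flags.getD k false = true := by
      intro k hk1 hk2
      rcases Nat.eq_or_lt_of_le hk1 with rfl | hk
      · exact hgi
      · have := tw_lt rest (k - i - 1) (by omega)
        rw [hrest, getD_drop] at this
        have harg : i + 1 + (k - i - 1) = k := by omega
        rwa [harg] at this
    have hglast : flags.getD (flags.length - 1) false = true := hall _ (by omega) (by omega)
    -- i cannot be 0 (else all of flags is true, contradicting hW)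
    have hipos : 0 < i := by
      by_contra hc
      have hz : i = 0 := by omega
      subst hz
      have := hall ((flags.takeWhile id).length) (by omega) (by omega)
      rw [hw0] at this
      simp at this
    have hprev : flags.getD (i-1) false = false := by
      rcases hpre hgi with ⟨h1, _⟩ | ⟨_, h2⟩
      · omega
      · exact h2
    have hw0le : (flags.takeWhile id).length ≤ i - 1 := tw_min flags (i-1) hprev
    -- the run length A computes at i
    set w0 := (flags.takeWhile id).length with hw0def
    have hD : aWhile flags (flags.length : Int) (i : Int) (((flags.length : Int)).toNat + 1) 0
        = ((flags.length - i + w0 : Nat) : Int) := by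
      have := aWhile_spec flags (flags.length : Int) (i : Int)
        (((flags.length : Int)).toNat + 1) 0 (flags.length - i + w0)
        (by simp; omega)
        (by
          intro j hj
          constructor
          · by_cases hjc : j < flags.length - i
            · have harg : (i : Int) + (0 + (j : Int)) = ((i + j : Nat) : Int) := by push_cast; ring
              rw [harg, mod_lt_eq _ _ (by positivity) (by push_cast; omega)]
              rw [PySem.List.pyGetD_natCast]
              exact hall (i+j) (by omega) (by omega)
            · have harg : (i : Int) + (0 + (j : Int)) = ((i + j : Nat) : Int) := by push_cast; ring
              rw [harg, mod_ge_eq _ _ (by push_cast; omega) (by push_cast; omega)]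
              have harg2 : ((i + j : Nat) : Int) - (flags.length : Int) = ((i + j - flags.length : Nat) : Int) := by
                push_cast [Nat.cast_sub (by omega : flags.length ≤ i + j)]; ring
              rw [harg2, PySem.List.pyGetD_natCast]
              exact tw_lt flags (i + j - flags.length) (by omega)
          · push_cast; omega)
        (by
          intro hc
          have harg : (i : Int) + (0 + ((flags.length - i + w0 : Nat) : Int)) = ((flags.length + w0 : Nat) : Int) := by
            push_cast [Nat.cast_sub (by omega : i ≤ flags.length)]; ring
          rw [harg] at hc
          have := hc.1
          rw [mod_ge_eq _ _ (by push_cast; omega) (by push_cast; omega)] at this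
          have harg2 : ((flags.length + w0 : Nat) : Int) - (flags.length : Int) = ((w0 : Nat) : Int) := by push_cast; ring
          rw [harg2, PySem.List.pyGetD_natCast, hw0] at this
          simp at this)
      rw [this]
      push_cast
      ring
    -- the head step appends (i, run); the rest of the range appends nothing
    rw [PySem.List.pyRange_one_cons (by push_cast; omega)]
    simp only [List.foldl_cons]
    have hstep : aStep flags (flags.length : Int) acc (i : Int)
        = acc ++ [((i : Int), ((flags.length - i + w0 : Nat) : Int))] := by
      rw [aStep, if_pos, hD]
      constructor
      · rw [PySem.List.pyGetD_natCast]; exact hgi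
      · have harg : (i : Int) - 1 = ((i - 1 : Nat) : Int) := by push_cast [Nat.cast_sub (by omega : 1 ≤ i)]; ring
        rw [harg, mod_lt_eq _ _ (by positivity) (by push_cast; omega)]
        rw [PySem.List.pyGetD_natCast, hprev]
        simp
    rw [hstep]
    have hnoop : (PySem.List.pyRange ((i : Int) + 1) (flags.length : Int) 1).foldl
        (aStep flags (flags.length : Int)) (acc ++ [((i : Int), ((flags.length - i + w0 : Nat) : Int))])
        = acc ++ [((i : Int), ((flags.length - i + w0 : Nat) : Int))] := by
      apply A_noop
      intro k hk1 hk2 hc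
      apply hc.2
      have hk0 : k - 1 = (((k - 1).toNat : Nat) : Int) := by omega
      rw [hk0, mod_lt_eq _ _ (by positivity) (by omega)]
      rw [PySem.List.pyGetD_natCast]
      exact hall ((k-1).toNat) (by omega) (by omega)
    rw [hnoop]
    rw [sScan]
    rw [dif_pos hle]
    simp only [castList, List.map_nil, List.nil_append, List.append_nil]
    rw [hifw]
    have : ((flags.length - i + w0 : Nat) : Int) = ((flags.length - i : Nat) : Int) + (w0 : Int) := by
      push_cast [Nat.cast_sub (by omega : i ≤ flags.length)]; ring
    rw [this]
  | case4 i rest t hle ih =>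
    intro acc hl hi hpre
    have hilt : i < flags.length := by
      have := congrArg List.length hl
      simp at this; omega
    have hlen : rest.length = flags.length - i - 1 := by
      have := congrArg List.length hl
      simp at this; omega
    have hrest : rest = flags.drop (i+1) := by
      have : (flags.drop i).tail = flags.drop (i+1) := by rw [List.tail_drop]
      rw [← hl] at this
      simpa using this
    have hgi : flags.getD i false = true := by
      have h0 := getD_drop flags i 0
      rw [← hl] at h0
      simpa using h0.symm
    have htlt : (rest.takeWhile id).length < rest.length := by omega
    -- block is flags[i..i+t], with flags[i+1+t] = false
    have hblock : ∀ k, i ≤ k → k ≤ i + (rest.takeWhile id).length → flags.getD k false = true := by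
      intro k hk1 hk2
      rcases Nat.eq_or_lt_of_le hk1 with rfl | hk
      · exact hgi
      · have := tw_lt rest (k - i - 1) (by omega)
        rw [hrest, getD_drop] at this
        have harg : i + 1 + (k - i - 1) = k := by omega
        rwa [harg] at this
    have hstop2 : flags.getD (i + (rest.takeWhile id).length + 1) false = false := by
      have h9 := tw_stop rest htlt
      generalize hgen : (rest.takeWhile id).length = k at h9 ⊢
      rw [hrest, getD_drop] at h9
      rwa [show i + 1 + k = i + k + 1 from by omega] at h9
    have hbound : i + (rest.takeWhile id).length + 1 < flags.length := by omega
    set t' := (rest.takeWhile id).length with ht'def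
    -- A's run length at i is t'+1
    have hD : aWhile flags (flags.length : Int) (i : Int) (((flags.length : Int)).toNat + 1) 0
        = ((t' + 1 : Nat) : Int) := by
      have := aWhile_spec flags (flags.length : Int) (i : Int)
        (((flags.length : Int)).toNat + 1) 0 (t' + 1)
        (by simp; omega)
        (by
          intro j hj
          constructor
          · have harg : (i : Int) + (0 + (j : Int)) = ((i + j : Nat) : Int) := by push_cast; ring
            rw [harg, mod_lt_eq _ _ (by positivity) (by push_cast; omega)]
            rw [PySem.List.pyGetD_natCast]
            exact hblock (i+j) (by omega) (by omega)
          · push_cast; omega)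
        (by
          intro hc
          have harg : (i : Int) + (0 + ((t' + 1 : Nat) : Int)) = ((i + t' + 1 : Nat) : Int) := by push_cast; ring
          rw [harg] at hc
          have := hc.1
          rw [mod_lt_eq _ _ (by positivity) (by push_cast; omega)] at this
          rw [PySem.List.pyGetD_natCast] at this
          have harg2 : i + t' + 1 = i + t' + 1 := rfl
          rw [show i + t' + 1 = i + (rest.takeWhile id).length + 1 from rfl] at this
          rw [hstop2] at this
          simp at this)
      rw [this]
      push_cast
      ring
    rw [PySem.List.pyRange_one_cons (by push_cast; omega)]
    simp only [List.foldl_cons]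
    have hstep : aStep flags (flags.length : Int) acc (i : Int)
        = acc ++ [((i : Int), ((t' + 1 : Nat) : Int))] := by
      rw [aStep, if_pos, hD]
      constructor
      · rw [PySem.List.pyGetD_natCast]; exact hgi
      · rcases hpre hgi with ⟨h1, h2⟩ | ⟨h1, h2⟩
        · subst h1
          have harg : ((0 : Nat) : Int) - 1 = (-1 : Int) := by norm_num
          rw [harg, mod_neg1 _ (by omega)]
          have harg2 : (flags.length : Int) - 1 = ((flags.length - 1 : Nat) : Int) := by
            push_cast [Nat.cast_sub (by omega : 1 ≤ flags.length)]; ring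
          rw [harg2, PySem.List.pyGetD_natCast, h2]
          simp
        · have harg : (i : Int) - 1 = ((i - 1 : Nat) : Int) := by push_cast [Nat.cast_sub (by omega : 1 ≤ i)]; ring
          rw [harg, mod_lt_eq _ _ (by positivity) (by push_cast; omega)]
          rw [PySem.List.pyGetD_natCast, h2]
          simp
    rw [hstep]
    -- split the remaining range at i+t'+2 ; the first part appends nothing
    rw [show ((i : Int) + 1) = ((i + 1 : Nat) : Int) by push_cast; ring]
    rw [PySem.List.pyRange_one_append ((i+1 : Nat) : Int) ((i + t' + 2 : Nat) : Int) (flags.length : Int)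
      (by push_cast; omega) (by push_cast; omega)]
    rw [List.foldl_append]
    have hnoop : (PySem.List.pyRange ((i+1 : Nat) : Int) ((i + t' + 2 : Nat) : Int) 1).foldl
        (aStep flags (flags.length : Int)) (acc ++ [((i : Int), ((t' + 1 : Nat) : Int))])
        = acc ++ [((i : Int), ((t' + 1 : Nat) : Int))] := by
      apply A_noop
      intro k hk1 hk2 hc
      apply hc.2
      have hk0 : k - 1 = (((k - 1).toNat : Nat) : Int) := by omega
      rw [hk0, mod_lt_eq _ _ (by positivity) (by push_cast at hk1 hk2 ⊢; omega)]
      rw [PySem.List.pyGetD_natCast]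
      exact hblock ((k-1).toNat) (by push_cast at hk1; omega) (by push_cast at hk2; omega)
    rw [hnoop]
    have hrest' : rest.drop (t' + 1) = flags.drop (i + t' + 2) := by
      rw [hrest, List.drop_drop]
      congr 1
      omega
    rw [ih (acc ++ [((i : Int), ((t' + 1 : Nat) : Int))]) hrest' (by omega) (by
      intro hg
      right
      exact ⟨by omega, by
        have : i + t' + 2 - 1 = i + t' + 1 := by omega
        rw [this]
        exact hstop2⟩)]
    rw [sScan]
    rw [dif_neg hle]
    simp only [castList, List.map_cons, castP]
    simp only [List.append_assoc, List.singleton_append]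
    rfl

theorem tw_lt_n (flags : List Bool) (hne : ¬ flags = []) (hAll : ¬ flags.all id = true) :
    (flags.takeWhile id).length < flags.length := by
  have hle := List.IsPrefix.length_le (List.takeWhile_prefix (l := flags) id)
  rcases Nat.eq_or_lt_of_le hle with he | h
  · exact absurd (tw_all flags he) hAll
  · exact h

theorem main_equiv (flags : List Bool) : contiguous_runs_py flags = contiguous_runs_py_alt flags := by
  by_cases hne : flags = []
  · subst hne; rfl
  by_cases hAll : flags.all id = true
  · -- all-True: A appends nothing (no run start exists), B returns [] by its guard
    rw [contiguous_runs_py_alt.eq_def, if_pos (Or.inr hAll)]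
    rw [A_def flags hne]
    apply A_noop
    intro k hk1 hk2 hc
    apply hc.2
    by_cases hk0 : k = 0
    · subst hk0
      rw [show (0 : Int) - 1 = -1 by ring, mod_neg1 _ (by
        have : 0 < flags.length := by cases flags with | nil => exact absurd rfl hne | cons a l => simp
        omega)]
      rw [show (flags.length : Int) - 1 = ((flags.length - 1 : Nat) : Int) by
        have : 0 < flags.length := List.length_pos_of_ne_nil hne
        push_cast [Nat.cast_sub (by omega : 1 ≤ flags.length)]; ring]
      rw [PySem.List.pyGetD_natCast]
      exact all_getD flags hAll _ (by have := List.length_pos_of_ne_nil hne; omega)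
    · rw [show k - 1 = (((k-1).toNat : Nat) : Int) by omega]
      rw [mod_lt_eq _ _ (by positivity) (by omega)]
      rw [PySem.List.pyGetD_natCast]
      exact all_getD flags hAll _ (by omega)
  -- main case: flags nonempty and not all True
  have hn0 : 0 < flags.length := List.length_pos_of_ne_nil hne
  have hW : (flags.takeWhile id).length < flags.length := tw_lt_n flags hne hAll
  have hw0stop : flags.getD ((flags.takeWhile id).length) false = false := tw_stop flags hW
  have hlastD : flags.getLast? = some (flags.getD (flags.length - 1) false) := last_getD flags hne
  have hB0 : PySem.List.pyGetD flags 0 false = flags.getD 0 false := by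
    rw [PySem.List.pyGetD_zero]
  have hBlast : PySem.List.pyGetD flags (-1) false = flags.getD (flags.length - 1) false := by
    rw [PySem.List.pyGetD_neg_one flags false hne]
    rw [List.getLast_eq_getElem]
    rw [List.getD_eq_getElem flags false (by omega)]
  rw [contiguous_runs_py_alt.eq_def, if_neg (by simp [hne, hAll])]
  simp only []
  rw [fold_none0 flags []]
  simp only [List.nil_append]
  rw [A_def flags hne]
  rw [hB0, hBlast]
  by_cases hG : flags.getD 0 false = true ∧ flags.getD (flags.length - 1) false = true
  · -- wrapping case
    obtain ⟨hg0, hglast⟩ := hG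
    set w0 := (flags.takeWhile id).length with hw0def
    have hw0pos : 0 < w0 := by
      rcases Nat.eq_zero_or_pos w0 with h | h
      · rw [h] at hw0stop
        rw [hw0stop] at hg0; simp at hg0
      · exact h
    have hw0ne : w0 ≠ flags.length - 1 := by
      intro hc
      rw [hc] at hw0stop
      rw [hw0stop] at hglast; simp at hglast
    have hw0lt : w0 + 1 < flags.length := by omega
    -- A: nothing appended on [0, w0+1), then A_fold from w0+1
    rw [PySem.List.pyRange_one_append 0 ((w0 + 1 : Nat) : Int) (flags.length : Int)
      (by positivity) (by push_cast; omega)]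
    rw [List.foldl_append]
    rw [show (0 : Int) = ((0 : Nat) : Int) by simp]
    rw [A_noop flags (flags.length : Int) _ _ [] (by
      intro k hk1 hk2 hc
      apply hc.2
      by_cases hk0 : k = 0
      · subst hk0
        rw [show (0 : Int) - 1 = -1 by ring, mod_neg1 _ (by omega)]
        rw [show (flags.length : Int) - 1 = ((flags.length - 1 : Nat) : Int) by
          push_cast [Nat.cast_sub (by omega : 1 ≤ flags.length)]; ring]
        rw [PySem.List.pyGetD_natCast]
        exact hglast
      · push_cast at hk1 hk2
        rw [show k - 1 = (((k-1).toNat : Nat) : Int) by omega]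
        rw [mod_lt_eq _ _ (by positivity) (by omega)]
        rw [PySem.List.pyGetD_natCast]
        exact tw_lt flags ((k-1).toNat) (by omega))]
    rw [A_fold flags hW (flags.drop (w0+1)) (w0+1) [] rfl (by omega) (by
      intro hg
      exact Or.inr ⟨by omega, by simpa using hw0stop⟩)]
    simp only [List.nil_append]
    -- B: compute sScan flags 0 by unfolding one block
    obtain ⟨b, rest0, hcons⟩ : ∃ b rest0, flags = b :: rest0 := by
      cases flags with
      | nil => exact absurd rfl hne
      | cons b r => exact ⟨b, r, rfl⟩
    have hb : b = true := by
      have := hg0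
      rw [hcons] at this
      simpa using this
    subst hb
    have ht0 : (rest0.takeWhile id).length = w0 - 1 := by
      rw [hw0def, hcons]
      simp [List.takeWhile]
    have hrest0len : rest0.length = flags.length - 1 := by rw [hcons]; simp
    have hS : sScan flags 0
        = ((0, w0) :: (sScan (flags.drop (w0+1)) (w0+1)).1, (sScan (flags.drop (w0+1)) (w0+1)).2) := by
      conv_lhs => rw [hcons]
      rw [sScan]
      rw [dif_neg (by rw [ht0]; omega)]
      simp only [ht0]
      have hd : rest0.drop (w0 - 1 + 1) = flags.drop (w0 + 1) := by
        rw [hcons]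
        rw [show w0 + 1 = (w0 - 1 + 1) + 1 by omega]
        simp [List.drop_succ_cons]
      rw [hd]
      rw [show 0 + (w0 - 1) + 2 = w0 + 1 by omega]
      rw [show w0 - 1 + 1 = w0 by omega]
    rw [hS]
    -- the trailing run of the suffix exists, since the last flag is True
    have hlast' : (flags.drop (w0+1)).getLast? = some true := by
      rw [getLast?_drop flags (w0+1) (by omega)]
      rw [hlastD, hglast]
    obtain ⟨s, hs⟩ := sScan_isSome (flags.drop (w0+1)) (w0+1) hlast'
    obtain ⟨hs1, hs2, _⟩ := sScan_some (flags.drop (w0+1)) (w0+1) s hs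
    have hslt : s < flags.length := by
      rw [List.length_drop] at hs2
      omega
    rw [hs]
    simp only [Option.map_some]
    rw [if_pos (⟨hg0, hglast⟩ : flags.getD 0 false = true ∧ flags.getD (flags.length - 1) false = true)]
    simp only [castList, List.map_cons, castP, List.cons_append]
    rw [List.getLast?_concat]
    simp only [Option.some.injEq]
    rw [List.dropLast_concat]
    rw [if_pos hg0]
    congr 1
    congr 1
    push_cast [Nat.cast_sub (by omega : s ≤ flags.length)]
    simp [Int.ofNat_eq_natCast]
    rfl
  · -- non-wrapping case
    rw [show (0 : Int) = ((0 : Nat) : Int) by simp]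
    rw [A_fold flags hW flags 0 [] (by simp) (by omega) (by
      intro hg
      left
      refine ⟨rfl, ?_⟩
      cases hcl : flags.getD (flags.length - 1) false with
      | false => rfl
      | true => exact absurd ⟨hg, hcl⟩ hG)]
    simp only [List.nil_append]
    rw [if_neg hG]
    cases hs : (sScan flags 0).2 with
    | none => simp [hs]
    | some s =>
      obtain ⟨hs1, hs2, hs3⟩ := sScan_some flags 0 s hs
      have hglast : flags.getD (flags.length - 1) false = true := by
        rw [hlastD] at hs3; simpa using hs3
      have hg0f : flags.getD 0 false = false := by
        cases hg : flags.getD 0 false with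
        | false => rfl
        | true => exact absurd ⟨hg, hglast⟩ hG
      simp only [hs, Option.map_some]
      rw [if_neg (by rw [hg0f]; simp)]
      congr 2
      push_cast [Nat.cast_sub (by omega : s ≤ flags.length)]
      simp [Int.ofNat_eq_natCast]

-- ===== VERDICT (by name: the statement is the Claim_ definition above) =====
theorem contiguous_runs_py_spec : Claim_equal_contiguous_runs_py := by
  intro flags _
  unfold Spec_contiguous_runs_py
  exact main_equiv flags
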